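-- pv_equiv track=rewrite | github.com/JSeam2/ProjectEuler | Python/215.py | is_solution
-- ===== SOURCE A (Python) =====
-- def is_solution(possible_solution):
-- 	"""
-- 	Check if a particular row_combination is valid
-- 	ie. no cracks
--
-- 	:Example:
--
-- 	Crack   Crack       Crack
-- 	|		|			|			|
-- 	|		|			|		|
-- 	"""
-- 	# Compare between n and n + 1 row combination
-- 	# If there is a matching sequence in the same place
-- 	# we reject
-- 	# [..., 2, 2, 3, ...], [..., 2, 2, 3, ...]
-- 	for i in range(len(possible_solution)):
-- 		if i + 1 < len(possible_solution):
-- 			row_1 = possible_solution[i]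
-- 			row_2 = possible_solution[i + 1]
--
-- 			# if the first row equals, we should immediately
-- 			for j in range(min(len(row_1), len(row_2))):
-- 				if sum(row_1[:j + 1]) == sum(row_2[:j + 1]):
-- 					if j + 1 == min(len(row_1), len(row_2)):
-- 						break
-- 					else:
-- 						return False
-- 		# We've reached the end. If solution survived, it is valid
-- 	return True
-- ===== SOURCE B (Python) =====
-- def is_solution(possible_solution):
--     # One pass per adjacent row pair with incremental running sums
--     # instead of recomputing each prefix sum via slicing (O(R*L) vs O(R*L^2)).
--     for row_1, row_2 in zip(possible_solution, possible_solution[1:]):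
--         s1 = s2 = 0
--         for a, b in list(zip(row_1, row_2))[:-1]:
--             s1 += a
--             s2 += b
--             if s1 == s2:
--                 return False
--     return True
-- ===== Notes on version B (the rewrite author's own statement) =====
-- stated objective: faster
-- what changed: Replaces the index loop with quadratic prefix-sum recomputation (sum(row[:j+1]) per j) by a single pass per adjacent row pair keeping two incremental running sums, iterating over zipped pairs.
import Mathlib
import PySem

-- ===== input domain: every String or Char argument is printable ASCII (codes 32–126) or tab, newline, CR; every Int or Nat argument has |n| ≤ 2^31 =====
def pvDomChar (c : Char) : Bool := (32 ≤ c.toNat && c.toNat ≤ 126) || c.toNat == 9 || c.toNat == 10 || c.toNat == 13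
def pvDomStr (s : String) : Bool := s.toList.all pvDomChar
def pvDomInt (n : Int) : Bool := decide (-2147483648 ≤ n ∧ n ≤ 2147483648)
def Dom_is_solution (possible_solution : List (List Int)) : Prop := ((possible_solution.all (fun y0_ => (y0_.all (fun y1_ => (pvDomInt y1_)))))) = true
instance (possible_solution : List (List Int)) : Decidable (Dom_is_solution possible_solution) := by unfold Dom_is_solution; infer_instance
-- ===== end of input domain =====

-- B replaces A's per-j prefix-sum recomputation by incremental running sums in one pass
-- per adjacent row pair (objective: faster, asymptotic O(R*L) vs O(R*L^2)).


-- ===== PORT A =====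
-- Inner loop of A: 'for j in range(m): if sum(row_1[:j+1]) == sum(row_2[:j+1]): if j+1 == m: break else: return False'.
-- Returns true iff the inner loop hits 'return False'.  row[:j+1] with j+1 ≥ 1 is List.take (j+1) (exact for a
-- nonnegative upper slice bound); sum of ints is List.sum (exact).
def isSolutionInnerA (r1 r2 : List Int) (m : Nat) : List Nat → Bool
  | [] => false
  | j :: rest =>
    if (r1.take (j + 1)).sum = (r2.take (j + 1)).sum then
      if j + 1 = m then false else true
    else isSolutionInnerA r1 r2 m rest

-- Outer loop of A: 'for i in range(len): if i+1 < len: … if inner returned False: return False'.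
-- possible_solution[i] with 0 ≤ i < len is getD i [] (exact: index always in range under the guard).
def isSolutionOuterA (ps : List (List Int)) : List Nat → Bool
  | [] => true
  | i :: rest =>
    if i + 1 < ps.length then
      let r1 := ps.getD i []
      let r2 := ps.getD (i + 1) []
      if isSolutionInnerA r1 r2 (min r1.length r2.length)
          (List.range (min r1.length r2.length)) then false
      else isSolutionOuterA ps rest
    else isSolutionOuterA ps rest

def is_solution (possible_solution : List (List Int)) : Bool :=
  isSolutionOuterA possible_solution (List.range possible_solution.length)

-- ===== PORT B =====
-- Inner loop of B: running sums s1, s2 over list(zip(row_1,row_2))[:-1]; true iff 'return False' is hit.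
def isSolutionInnerB : List (Int × Int) → Int → Int → Bool
  | [], _, _ => false
  | (a, b) :: rest, s1, s2 =>
    if s1 + a = s2 + b then true else isSolutionInnerB rest (s1 + a) (s2 + b)

-- Outer loop of B over zip(possible_solution, possible_solution[1:]); ps[1:] = ps.tail (exact),
-- list(zip(..))[:-1] = dropLast (exact: slice [:-1] drops exactly the last element, [] on []).
def isSolutionOuterB : List (List Int × List Int) → Bool
  | [] => true
  | (r1, r2) :: rest =>
    if isSolutionInnerB ((r1.zip r2).dropLast) 0 0 then false
    else isSolutionOuterB rest

def is_solution_alt (possible_solution : List (List Int)) : Bool :=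
  isSolutionOuterB (possible_solution.zip possible_solution.tail)

-- ===== PRECONDITION & SPEC =====
def Spec_is_solution (possible_solution : List (List Int)) (out : Bool) : Prop := out = is_solution_alt possible_solution
instance (possible_solution : List (List Int)) (out : Bool) : Decidable (Spec_is_solution possible_solution out) := by unfold Spec_is_solution; infer_instance

-- ===== CLAIM (what is proved, stated in full; the proofs are below) =====
def Claim_equal_is_solution : Prop := ∀ (possible_solution : List (List Int)), Dom_is_solution possible_solution → Spec_is_solution possible_solution (is_solution possible_solution)

-- ===== LEMMAS AND PROOFS =====

-- The property both inner loops decide: some common prefix of j+1 bricks (j+1 strictly below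
-- the shorter row's length) has equal sums in the two rows.
theorem innerA_iff (r1 r2 : List Int) (m : Nat) :
    ∀ n s, s + n = m →
      (isSolutionInnerA r1 r2 m (List.range' s n) = true ↔
        ∃ j, s ≤ j ∧ j + 1 < m ∧ (r1.take (j + 1)).sum = (r2.take (j + 1)).sum) := by
  intro n
  induction n with
  | zero =>
    intro s h
    simp only [List.range'_zero, isSolutionInnerA]
    constructor
    · intro hh; cases hh
    · rintro ⟨j, h1, h2, _⟩; omega
  | succ k ih =>
    intro s h
    rw [List.range'_succ]
    simp only [isSolutionInnerA]
    split_ifs with h1 h2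
    · -- equal sums at s and s + 1 = m: A breaks, and no j with j + 1 < m = s + 1 exists at or above s
      constructor
      · intro hh; cases hh
      · rintro ⟨j, hj1, hj2, _⟩; omega
    · -- equal sums at s with s + 1 < m: A returns False
      constructor
      · intro _; exact ⟨s, le_refl s, by omega, h1⟩
      · intro _; rfl
    · -- sums differ at s: continue with the tail
      rw [ih (s + 1) (by omega)]
      constructor
      · rintro ⟨j, hj1, hj2, hj3⟩; exact ⟨j, by omega, hj2, hj3⟩
      · rintro ⟨j, hj1, hj2, hj3⟩
        refine ⟨j, ?_, hj2, hj3⟩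
        rcases Nat.eq_or_lt_of_le hj1 with rfl | hlt
        · exact absurd hj3 h1
        · omega

theorem innerB_iff :
    ∀ (l : List (Int × Int)) (s1 s2 : Int),
      (isSolutionInnerB l s1 s2 = true ↔
        ∃ j < l.length, s1 + ((l.take (j + 1)).map Prod.fst).sum =
                        s2 + ((l.take (j + 1)).map Prod.snd).sum) := by
  intro l
  induction l with
  | nil =>
    intro s1 s2
    simp [isSolutionInnerB]
  | cons p rest ih =>
    intro s1 s2
    obtain ⟨a, b⟩ := p
    simp only [isSolutionInnerB, List.length_cons]
    split_ifs with h1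
    · constructor
      · intro _
        exact ⟨0, by omega, by simpa using h1⟩
      · intro _; rfl
    · rw [ih (s1 + a) (s2 + b)]
      constructor
      · rintro ⟨j, hj, hsum⟩
        refine ⟨j + 1, by omega, ?_⟩
        simp only [List.take_succ_cons, List.map_cons, List.sum_cons]
        omega
      · rintro ⟨j, hj, hsum⟩
        cases j with
        | zero =>
          exfalso; apply h1
          simpa using hsum
        | succ j' =>
          refine ⟨j', by omega, ?_⟩
          simp only [List.take_succ_cons, List.map_cons, List.sum_cons] at hsum
          omega

-- take of a zip projects to take of the components (below the other component's length)
theorem zip_take_fst :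
    ∀ (r1 r2 : List Int) (t : Nat), t ≤ r2.length →
      ((r1.zip r2).take t).map Prod.fst = r1.take t := by
  intro r1
  induction r1 with
  | nil => intro r2 t _; simp
  | cons a r1 ih =>
    intro r2 t ht
    cases r2 with
    | nil =>
      have ht0 : t = 0 := Nat.le_zero.mp (by simpa using ht)
      subst ht0; simp
    | cons b r2 =>
      cases t with
      | zero => simp
      | succ t' =>
        simp only [List.zip_cons_cons, List.take_succ_cons, List.map_cons, List.cons.injEq,
          true_and]
        exact ih r2 t' (by simpa using ht)

theorem zip_take_snd :
    ∀ (r1 r2 : List Int) (t : Nat), t ≤ r1.length →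
      ((r1.zip r2).take t).map Prod.snd = r2.take t := by
  intro r1
  induction r1 with
  | nil =>
    intro r2 t ht
    have ht0 : t = 0 := Nat.le_zero.mp (by simpa using ht)
    subst ht0; simp
  | cons a r1 ih =>
    intro r2 t ht
    cases r2 with
    | nil => simp
    | cons b r2 =>
      cases t with
      | zero => simp
      | succ t' =>
        simp only [List.zip_cons_cons, List.take_succ_cons, List.map_cons, List.cons.injEq,
          true_and]
        exact ih r2 t' (by simpa using ht)

-- the two inner loops agree on every adjacent pair of rows
theorem inner_pair_eq (r1 r2 : List Int) :
    isSolutionInnerA r1 r2 (min r1.length r2.length)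
        (List.range (min r1.length r2.length)) =
      isSolutionInnerB ((r1.zip r2).dropLast) 0 0 := by
  set m := min r1.length r2.length with hm
  rw [List.range_eq_range']
  have hA := innerA_iff r1 r2 m m 0 (by omega)
  have hB := innerB_iff ((r1.zip r2).dropLast) 0 0
  have hlen : (r1.zip r2).dropLast.length = m - 1 := by
    simp [List.length_dropLast, List.length_zip, hm]
  apply Bool.eq_iff_iff.mpr
  rw [hA, hB, hlen]
  have h1le : m ≤ r1.length := hm ▸ Nat.min_le_left _ _
  have h2le : m ≤ r2.length := hm ▸ Nat.min_le_right _ _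
  constructor
  · rintro ⟨j, _, hj2, hj3⟩
    refine ⟨j, by omega, ?_⟩
    rw [List.dropLast_eq_take, List.take_take, List.length_zip, ← hm]
    rw [show min (j + 1) (m - 1) = j + 1 by omega]
    rw [zip_take_fst r1 r2 (j + 1) (Nat.le_trans (Nat.le_of_lt hj2) h2le),
      zip_take_snd r1 r2 (j + 1) (Nat.le_trans (Nat.le_of_lt hj2) h1le)]
    simp [hj3]
  · rintro ⟨j, hj, hsum⟩
    have hj2 : j + 1 < m := by omega
    rw [List.dropLast_eq_take, List.take_take, List.length_zip, ← hm] at hsum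
    rw [show min (j + 1) (m - 1) = j + 1 by omega] at hsum
    rw [zip_take_fst r1 r2 (j + 1) (Nat.le_trans (Nat.le_of_lt hj2) h2le),
      zip_take_snd r1 r2 (j + 1) (Nat.le_trans (Nat.le_of_lt hj2) h1le)] at hsum
    exact ⟨j, Nat.zero_le j, hj2, by simpa using hsum⟩

-- the outer loops agree, suffix by suffix
theorem outer_eq (ps : List (List Int)) :
    ∀ n s, s + n = ps.length →
      isSolutionOuterA ps (List.range' s n) =
        isSolutionOuterB ((ps.drop s).zip (ps.drop s).tail) := by
  intro n
  induction n with
  | zero =>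
    intro s h
    have hnil : ps.drop s = [] := List.drop_eq_nil_of_le (by omega)
    simp [hnil, isSolutionOuterA, isSolutionOuterB]
  | succ k ih =>
    intro s h
    rw [List.range'_succ]
    simp only [isSolutionOuterA]
    have hs : s < ps.length := by omega
    cases k with
    | zero =>
      have hg : ¬ (s + 1 < ps.length) := by omega
      rw [if_neg hg]
      have hd : ps.drop s = [ps[s]] := by
        rw [List.drop_eq_getElem_cons hs, List.drop_eq_nil_of_le (by omega)]
      simp [hd, isSolutionOuterA, isSolutionOuterB]
    | succ k' =>
      have hg : s + 1 < ps.length := by omega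
      rw [if_pos hg]
      have ha : ps.getD s [] = ps[s] := by
        simp [List.getD_eq_getElem?_getD, List.getElem?_eq_getElem hs]
      have hb : ps.getD (s + 1) [] = ps[s + 1] := by
        simp [List.getD_eq_getElem?_getD, List.getElem?_eq_getElem hg]
      have hds : ps.drop s = ps[s] :: ps.drop (s + 1) := List.drop_eq_getElem_cons hs
      have hds1 : ps.drop (s + 1) = ps[s + 1] :: ps.drop (s + 2) := List.drop_eq_getElem_cons hg
      rw [hds, hds1]
      simp only [List.tail_cons, List.zip_cons_cons, isSolutionOuterB]
      rw [← hds1, ha, hb, inner_pair_eq]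
      split_ifs with hc
      · rfl
      · rw [ih (s + 1) (by omega), hds1, List.tail_cons]

-- ===== VERDICT (by name: the statement is the Claim_ definition above) =====
theorem is_solution_spec : Claim_equal_is_solution := by
  intro ps _
  unfold Spec_is_solution is_solution is_solution_alt
  rw [List.range_eq_range', outer_eq ps ps.length 0 (by omega)]
  rfl
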